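-- pv_equiv track=rewrite | github.com/MridulBatra1/AI- | Assignment 03/3.py | dls_blocks_world
-- ===== SOURCE A (Python) =====
-- def dls_blocks_world(initial, goal, depth_limit):
--     stack = [(initial, [], 0)]
--     visited = set()
--
--     while stack:
--         state, path, depth = stack.pop()
--         if state == goal:
--             return path
--         if tuple(tuple(stack) for stack in state) in visited or depth >= depth_limit:
--             continue
--         visited.add(tuple(tuple(stack) for stack in state))
--
--         for i in range(len(state)):
--             if state[i]:
--                 block = state[i][-1]
--                 new_state = [list(stack) for stack in state]
--                 new_state[i].pop()
--                 for j in range(len(new_state)):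
--                     if j != i:
--                         next_state = [list(stack) for stack in new_state]
--                         next_state[j].append(block)
--                         stack.append((tuple(tuple(stack) for stack in next_state), path + [(block, i, j)], depth + 1))
--     return None
-- ===== SOURCE B (Python) =====
-- def dls_blocks_world(initial, goal, depth_limit):
--     # A's goal test `state == goal` compares the tuple-of-tuples states it pushes
--     # against the list-of-lists goal, which is always False in Python; only the very
--     # first pop (the initial state, still a list) can match. So A returns [] exactly
--     # when initial == goal and otherwise exhausts its search and returns None.
--     # B returns that exact value directly, without the search.
--     return [] if initial == goal else None
-- ===== Notes on version B (the rewrite author's own statement) =====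
-- stated objective: faster
-- what changed: A's goal test compares tuple-of-tuples states against the list-of-lists goal, which is always False in Python, so A succeeds only when the initial state itself equals the goal and otherwise runs its whole depth-limited search just to return None; B returns the same value ([] if initial == goal else None) by a single comparison, with no search.
import Mathlib
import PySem

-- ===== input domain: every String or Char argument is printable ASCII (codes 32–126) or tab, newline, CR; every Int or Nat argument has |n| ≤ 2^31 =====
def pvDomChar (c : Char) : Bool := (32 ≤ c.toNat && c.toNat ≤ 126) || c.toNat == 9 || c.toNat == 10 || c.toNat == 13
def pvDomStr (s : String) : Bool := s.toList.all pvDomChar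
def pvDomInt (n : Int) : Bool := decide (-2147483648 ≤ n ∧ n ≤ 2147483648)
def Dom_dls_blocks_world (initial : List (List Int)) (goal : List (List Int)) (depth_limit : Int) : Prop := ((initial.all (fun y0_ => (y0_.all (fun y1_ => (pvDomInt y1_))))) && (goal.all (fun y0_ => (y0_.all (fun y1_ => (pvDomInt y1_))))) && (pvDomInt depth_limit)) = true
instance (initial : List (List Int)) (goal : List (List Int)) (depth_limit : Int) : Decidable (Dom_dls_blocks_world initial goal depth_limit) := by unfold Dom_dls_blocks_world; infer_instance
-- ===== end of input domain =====

-- B replaces A's depth-limited search by the single comparison it is provably equivalent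
-- to: A's goal test compares tuple states against the list goal (always False in Python),
-- so A returns [] iff initial = goal and None otherwise; objective: faster.

-- ===== PORT A =====
-- A frame is ((state, isTuple), path, depth). The Bool tag models Python's cross-type
-- equality exactly: the initial frame holds a LIST (tag false), every pushed frame holds
-- a TUPLE of tuples (tag true), and Python's `state == goal` (goal being a list) is True
-- only when the tag is false and the contents are equal.
abbrev FrameA := (List (List Int) × Bool) × List (Int × Int × Int) × Int

-- the frames A's two nested `for` loops append for an expanded state, in append order
def expandA (st : List (List Int)) (p : List (Int × Int × Int)) (d : Int) : List FrameA :=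
  (List.range st.length).flatMap (fun i =>
    if st[i]! ≠ [] then
      (List.range (st.set i ((st[i]!).dropLast)).length).flatMap (fun j =>
        if j ≠ i then
          [(((st.set i ((st[i]!).dropLast)).set j ((st.set i ((st[i]!).dropLast))[j]! ++ [(st[i]!).getLast!]), true),
            p ++ [((st[i]!).getLast!, (i : Int), (j : Int))], d + 1)]
        else [])
    else [])

def muA (L : Int) (f : FrameA) : Nat :=
  (f.1.1.length * f.1.1.length + 1) ^ ((L - f.2.2).toNat)

theorem mem_expandA {st : List (List Int)} {p : List (Int × Int × Int)} {d : Int}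
    {f : FrameA} (h : f ∈ expandA st p d) :
    f.1.1.length = st.length ∧ f.2.2 = d + 1 ∧ f.1.2 = true := by
  simp only [expandA, List.mem_flatMap, List.mem_range] at h
  obtain ⟨i, _, hi⟩ := h
  split at hi
  · simp only [List.mem_flatMap, List.mem_range] at hi
    obtain ⟨j, _, hj⟩ := hi
    split at hj
    · simp only [List.mem_singleton] at hj
      subst hj; simp
    · simp at hj
  · simp at hi

theorem length_expandA (st : List (List Int)) (p : List (Int × Int × Int)) (d : Int) :
    (expandA st p d).length ≤ st.length * st.length := by
  rw [expandA, List.length_flatMap]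
  calc ((List.range st.length).map
          (fun i => (if st[i]! ≠ [] then _ else ([] : List FrameA)).length)).sum
      ≤ ((List.range st.length).map (fun i =>
          (if st[i]! ≠ [] then _ else ([] : List FrameA)).length)).length * st.length := by
        apply List.sum_le_card_nsmul
        intro x hx
        simp only [List.mem_map, List.mem_range] at hx
        obtain ⟨i, _, hix⟩ := hx
        subst hix
        split
        · rw [List.length_flatMap]
          calc _ ≤ ((List.range (st.set i ((st[i]!).dropLast)).length).map _).length * 1 :=
                List.sum_le_card_nsmul _ 1 (by
                  intro y hy
                  simp only [List.mem_map, List.mem_range] at hy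
                  obtain ⟨j, _, hjy⟩ := hy
                  subst hjy
                  split <;> simp)
            _ ≤ st.length := by simp
        · simp
    _ = st.length * st.length := by simp

-- Python's `stack` kept TOP-FIRST (pop = head); sequential appends become reverse-prepend.
def loopA (goal : List (List Int)) (L : Int) :
    List FrameA → PySem.Set (List (List Int)) → Option (List (Int × Int × Int))
  | [], _ => none
  | ((st, isT), p, d) :: rest, v =>
    if isT = false ∧ st = goal then some p
    else if PySem.Set.contains v st ∨ d ≥ L then loopA goal L rest v
    else loopA goal L ((expandA st p d).reverse ++ rest) (PySem.Set.add v st)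
  termination_by fs _ => (fs.map (muA L)).sum
  decreasing_by
  · simp only [List.map_cons, List.sum_cons]
    have : 0 < muA L ((st, isT), p, d) := pow_pos (by omega) _
    omega
  · rename_i hgoal hcont
    simp only [List.map_append, List.sum_append, List.map_reverse, List.sum_reverse,
      List.map_cons, List.sum_cons]
    have hd : d < L := by
      rcases not_or.mp hcont with ⟨-, h2⟩; omega
    have hk : (L - d).toNat = (L - (d + 1)).toNat + 1 := by omega
    have hbound : ((expandA st p d).map (muA L)).sum ≤
        (st.length * st.length) * (st.length * st.length + 1) ^ ((L - (d + 1)).toNat) := by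
      calc ((expandA st p d).map (muA L)).sum
          ≤ ((expandA st p d).map (muA L)).length *
              ((st.length * st.length + 1) ^ ((L - (d + 1)).toNat)) := by
            apply List.sum_le_card_nsmul
            intro x hx
            simp only [List.mem_map] at hx
            obtain ⟨f, hf, hfx⟩ := hx
            obtain ⟨h1, h2, -⟩ := mem_expandA hf
            subst hfx
            simp [muA, h1, h2]
        _ ≤ _ := by
            simp only [List.length_map]
            exact Nat.mul_le_mul_right _ (length_expandA st p d)
    have hlt : ((expandA st p d).map (muA L)).sum < muA L ((st, isT), p, d) := by
      calc ((expandA st p d).map (muA L)).sum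
          ≤ (st.length * st.length) * (st.length * st.length + 1) ^ ((L - (d + 1)).toNat) := hbound
        _ < (st.length * st.length + 1) * (st.length * st.length + 1) ^ ((L - (d + 1)).toNat) := by
            have : 0 < (st.length * st.length + 1) ^ ((L - (d + 1)).toNat) :=
              pow_pos (by omega) _
            exact Nat.mul_lt_mul_of_lt_of_le (by omega) (le_refl _) this
        _ = muA L ((st, isT), p, d) := by
            simp [muA, hk, pow_succ, Nat.mul_comm]
    omega

def dls_blocks_world (initial : List (List Int)) (goal : List (List Int)) (depth_limit : Int) : Option (List (Int × Int × Int)) :=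
  loopA goal depth_limit [((initial, false), [], 0)] PySem.Set.empty

-- ===== PORT B =====
def dls_blocks_world_alt (initial : List (List Int)) (goal : List (List Int)) (depth_limit : Int) : Option (List (Int × Int × Int)) :=
  if initial = goal then some [] else none

-- ===== PRECONDITION & SPEC =====
def Spec_dls_blocks_world (initial : List (List Int)) (goal : List (List Int)) (depth_limit : Int) (out : Option (List (Int × Int × Int))) : Prop := out = dls_blocks_world_alt initial goal depth_limit
instance (initial : List (List Int)) (goal : List (List Int)) (depth_limit : Int) (out : Option (List (Int × Int × Int))) : Decidable (Spec_dls_blocks_world initial goal depth_limit out) := by unfold Spec_dls_blocks_world; infer_instance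

-- ===== CLAIM (what is proved, stated in full; the proofs are below) =====
def Claim_equal_dls_blocks_world : Prop := ∀ (initial : List (List Int)) (goal : List (List Int)) (depth_limit : Int), Dom_dls_blocks_world initial goal depth_limit → Spec_dls_blocks_world initial goal depth_limit (dls_blocks_world initial goal depth_limit)

-- ===== LEMMAS AND PROOFS =====

-- once every frame on the stack holds a tuple state, `state == goal` can never be True
theorem loopA_all_tuple (goal : List (List Int)) (L : Int) :
    ∀ (fs : List FrameA) (v : PySem.Set (List (List Int))),
      (∀ f ∈ fs, f.1.2 = true) → loopA goal L fs v = none := by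
  intro fs v h
  induction fs, v using loopA.induct goal L with
  | case1 => simp [loopA]
  | case2 st isT p d rest v hg =>
      have ht : isT = true := h ((st, isT), p, d) (by simp)
      rw [ht] at hg
      simp at hg
  | case3 st isT p d rest v hg hcont ih =>
      rw [loopA, if_neg hg, if_pos hcont]
      exact ih (fun f hf => h f (List.mem_cons_of_mem _ hf))
  | case4 st isT p d rest v hg hcont ih =>
      rw [loopA, if_neg hg, if_neg hcont]
      apply ih
      intro f hf
      rcases List.mem_append.mp hf with h1 | h2
      · exact (mem_expandA (List.mem_reverse.mp h1)).2.2
      · exact h f (List.mem_cons_of_mem _ h2)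

-- ===== VERDICT (by name: the statement is the Claim_ definition above) =====
theorem dls_blocks_world_spec : Claim_equal_dls_blocks_world := by
  intro initial goal L _
  unfold Spec_dls_blocks_world dls_blocks_world dls_blocks_world_alt
  rw [loopA]
  by_cases hg : initial = goal
  · simp [hg]
  · simp only [hg, and_false, if_false]
    split
    · exact loopA_all_tuple goal L [] _ (by simp)
    · exact loopA_all_tuple goal L _ _ (fun f hf => by
        simpa using (mem_expandA (List.mem_reverse.mp (by simpa using hf))).2.2)
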